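-- pv_equiv track=rewrite | github.com/KathTheDragon/ConlangerOld | core.py | nest_split
-- ===== SOURCE A (Python) =====
-- def nest_split(string, sep, nests, level):
--     '''Nesting-aware string splitting.
--
--     Arguments:
--         string -- the string to be split (str)
--         sep    -- the separator character(s) (str)
--         nests  -- a tuple of the form (open, close) containing opening and closing nesting characters (tuple)
--         level  -- the nesting level at which splitting should take place (int)
--
--     Returns a list.
--     '''
--     depth = 0
--     for i in range(len(string)):
--         if string[i] in sep and depth == level:
--             string = string[:i] + ' ' + string[i+1:]
--         if string[i] in nests[0]:
--             depth += 1
--         if string[i] in nests[1]: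
--             depth -= 1
--     return string.split(' ')
-- ===== SOURCE B (Python) =====
-- def nest_split(string, sep, nests, level):
--     result, cur, depth = [], '', 0
--     for c in string:
--         ec = ' ' if (c in sep and depth == level) else c
--         if ec == ' ':
--             result.append(cur)
--             cur = ''
--         else:
--             cur += ec
--         if ec in nests[0]:
--             depth += 1
--         if ec in nests[1]:
--             depth -= 1
--     result.append(cur)
--     return result
-- ===== Notes on version B (the rewrite author's own statement) =====
-- stated objective: alternative
-- what changed: B replaces A's loop that rewrites separator characters in a copy of the string and then calls split(' ') with a single-pass tokenizer that computes each effective character once and appends finished tokens directly to the result list, never building a transformed string or calling split.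
import Mathlib
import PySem

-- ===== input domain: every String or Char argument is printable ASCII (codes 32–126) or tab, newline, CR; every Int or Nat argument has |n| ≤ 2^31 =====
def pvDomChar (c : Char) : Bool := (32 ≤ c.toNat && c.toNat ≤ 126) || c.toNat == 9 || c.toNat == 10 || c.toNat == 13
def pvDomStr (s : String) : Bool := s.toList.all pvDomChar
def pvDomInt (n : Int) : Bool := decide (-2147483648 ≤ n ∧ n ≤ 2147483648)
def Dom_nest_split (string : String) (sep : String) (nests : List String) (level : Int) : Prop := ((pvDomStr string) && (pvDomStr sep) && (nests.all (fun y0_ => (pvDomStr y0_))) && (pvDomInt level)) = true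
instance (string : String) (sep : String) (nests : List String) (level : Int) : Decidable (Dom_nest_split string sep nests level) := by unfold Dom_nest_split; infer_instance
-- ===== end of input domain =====

-- B replaces A's rebuild-the-string-then-split(' ') loop by a single-pass tokenizer that
-- emits tokens directly (a different decomposition of the same task).

-- ===== PORT A =====
-- One iteration of A's index loop: state is (current string as chars, depth).
-- 'c in sep' on a single character is ported as list membership (exact for 1-char needles);
-- string[i] is in range throughout, so pyGetD's default is never consulted.
def stepA (sepL openL closeL : List Char) (level : Int) (st : List Char × Int) (i : Int) : List Char × Int :=
  let s := st.1
  let depth := st.2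
  let s := if sepL.contains (PySem.List.pyGetD s i ' ') ∧ depth = level then
      PySem.List.slice s none (some i) ++ [' '] ++ PySem.List.slice s (some (i + 1)) none
    else s
  let c := PySem.List.pyGetD s i ' '
  let depth := if openL.contains c then depth + 1 else depth
  let depth := if closeL.contains c then depth - 1 else depth
  (s, depth)

-- nests[0]/nests[1]: Python raises IndexError when nests is too short and the loop body runs;
-- those inputs are excluded by Pre_ below, so the getD default is never consulted on admitted inputs.
def nest_split (string : String) (sep : String) (nests : List String) (level : Int) : List String :=
  let cs := string.toList
  let r := (PySem.List.pyRange 0 (cs.length : Int) 1).foldl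
    (stepA sep.toList (nests.getD 0 "").toList (nests.getD 1 "").toList level) (cs, 0)
  (PySem.Chars.splitOn r.1 [' ']).map String.ofList

-- ===== PORT B =====
-- One step of B's tokenizer: state is (finished tokens, current token, depth).
def stepB (sepL openL closeL : List Char) (level : Int) (st : List String × List Char × Int) (c : Char) :
    List String × List Char × Int :=
  let res := st.1
  let cur := st.2.1
  let depth := st.2.2
  let ec := if sepL.contains c ∧ depth = level then ' ' else c
  let rc := if ec = ' ' then (res ++ [String.ofList cur], ([] : List Char)) else (res, cur ++ [ec])
  let depth := if openL.contains ec then depth + 1 else depth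
  let depth := if closeL.contains ec then depth - 1 else depth
  (rc.1, rc.2, depth)

def nest_split_alt (string : String) (sep : String) (nests : List String) (level : Int) : List String :=
  let st := string.toList.foldl
    (stepB sep.toList (nests.getD 0 "").toList (nests.getD 1 "").toList level) ([], [], 0)
  st.1 ++ [String.ofList st.2.1]

-- ===== PRECONDITION & SPEC =====
-- Pre_ excludes exactly the inputs where Python A raises IndexError: a non-empty string with
-- fewer than two nest classes (nests[0]/nests[1] are read once the loop body runs).
def Pre_nest_split (string : String) (sep : String) (nests : List String) (level : Int) : Prop :=
  string = "" ∨ 2 ≤ nests.length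
instance (string : String) (sep : String) (nests : List String) (level : Int) : Decidable (Pre_nest_split string sep nests level) := by unfold Pre_nest_split; infer_instance

def pvWitness_nest_split : String × String × List String × Int := ("a(b c)d e", " ", ["(", ")"], 0)

def Spec_nest_split (string : String) (sep : String) (nests : List String) (level : Int) (out : List String) : Prop := out = nest_split_alt string sep nests level
instance (string : String) (sep : String) (nests : List String) (level : Int) (out : List String) : Decidable (Spec_nest_split string sep nests level out) := by unfold Spec_nest_split; infer_instance

-- ===== CLAIM (what is proved, stated in full; the proofs are below) =====
def Claim_equal_nest_split : Prop := ∀ (string : String) (sep : String) (nests : List String) (level : Int), Dom_nest_split string sep nests level → Pre_nest_split string sep nests level → Spec_nest_split string sep nests level (nest_split string sep nests level)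

-- ===== LEMMAS AND PROOFS =====

-- The effective character A writes at a position (and B tokenizes on), and the depth update.
def effC (sepL : List Char) (level depth : Int) (c : Char) : Char :=
  if sepL.contains c ∧ depth = level then ' ' else c

def newD (openL closeL : List Char) (depth : Int) (ec : Char) : Int :=
  let d := if openL.contains ec then depth + 1 else depth
  if closeL.contains ec then d - 1 else d

-- The transformed character stream together with the final depth.
def mapEffD (sepL openL closeL : List Char) (level : Int) : List Char → Int → List Char × Int
  | [], d => ([], d)
  | c :: cs, d =>
      let ec := effC sepL level d c
      let r := mapEffD sepL openL closeL level cs (newD openL closeL d ec)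
      (ec :: r.1, r.2)

-- Straightforward recursive split on ' '.
def splitSp : List Char → List (List Char)
  | [] => [[]]
  | c :: cs =>
      if c = ' ' then [] :: splitSp cs
      else
        match splitSp cs with
        | [] => [[c]]
        | p :: ps => (c :: p) :: ps

def consFirst (x : List Char) : List (List Char) → List (List Char)
  | [] => [x]
  | p :: ps => (x ++ p) :: ps

theorem splitSp_ne_nil (l : List Char) : splitSp l ≠ [] := by
  cases l with
  | nil => simp [splitSp]
  | cons c cs =>
    simp only [splitSp]
    split
    · simp
    · cases h : splitSp cs <;> simp

theorem consFirst_consFirst (x y : List Char) (l : List (List Char)) (h : l ≠ []) :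
    consFirst x (consFirst y l) = consFirst (x ++ y) l := by
  cases l with
  | nil => exact absurd rfl h
  | cons p ps => simp [consFirst]

theorem splitOn_go_spec : ∀ (fuel : Nat) (l cur : List Char) (hacc : List (List Char)),
    l.length < fuel →
    PySem.Chars.splitOn.go [' '] fuel l cur hacc = hacc.reverse ++ consFirst cur.reverse (splitSp l) := by
  intro fuel
  induction fuel with
  | zero => intro l cur hacc h; omega
  | succ f ih =>
    intro l cur hacc h
    cases l with
    | nil => simp [PySem.Chars.splitOn.go, splitSp, consFirst]
    | cons c rest =>
      by_cases hc : c = ' '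
      · subst hc
        rw [show PySem.Chars.splitOn.go [' '] (f+1) (' ' :: rest) cur hacc
              = PySem.Chars.splitOn.go [' '] f rest [] (cur.reverse :: hacc) by
            simp [PySem.Chars.splitOn.go, List.isPrefixOf]]
        rw [ih rest [] (cur.reverse :: hacc) (by simpa using Nat.lt_of_succ_lt_succ h)]
        cases hs : splitSp rest with
        | nil => exact absurd hs (splitSp_ne_nil rest)
        | cons p ps => simp [splitSp, consFirst, hs]
      · have hc' : (' ' == c) = false := by simpa using fun h => hc h.symm
        rw [show PySem.Chars.splitOn.go [' '] (f+1) (c :: rest) cur hacc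
              = PySem.Chars.splitOn.go [' '] f rest (c :: cur) hacc by
            simp [PySem.Chars.splitOn.go, List.isPrefixOf, hc']]
        rw [ih rest (c :: cur) hacc (by simpa using Nat.lt_of_succ_lt_succ h)]
        cases hs : splitSp rest with
        | nil => exact absurd hs (splitSp_ne_nil rest)
        | cons p ps =>
          simp [splitSp, consFirst, hs, hc, consFirst_consFirst]

theorem splitOn_eq_splitSp (l : List Char) :
    PySem.Chars.splitOn l [' '] = splitSp l := by
  unfold PySem.Chars.splitOn
  rw [splitOn_go_spec (l.length + 1) l [] [] (by omega)]
  cases hs : splitSp l with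
  | nil => exact absurd hs (splitSp_ne_nil l)
  | cons p ps => simp [consFirst]

-- helper index facts at the split point
theorem getD_append_cons (pre rest : List Char) (c d : Char) :
    (pre ++ c :: rest).getD pre.length d = c := by
  induction pre with
  | nil => rfl
  | cons a pre ih => simpa using ih

theorem take_append_cons (pre rest : List Char) (c : Char) :
    (pre ++ c :: rest).take pre.length = pre := by
  simpa using List.take_left pre (c :: rest)

theorem drop_append_cons (pre rest : List Char) (c : Char) :
    (pre ++ c :: rest).drop (pre.length + 1) = rest := by
  induction pre with
  | nil => rfl
  | cons a pre ih => simpa using ih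

-- A's loop, characterized: after processing indices [|pre|, |pre|+|post|) the string is
-- pre ++ (transformed post) and the depth is the final depth of that transformation.
theorem loopA_spec (sepL openL closeL : List Char) (level : Int) :
    ∀ (post pre : List Char) (d : Int),
    (PySem.List.pyRange (pre.length : Int) ((pre.length : Int) + (post.length : Int)) 1).foldl
        (stepA sepL openL closeL level) (pre ++ post, d)
      = (pre ++ (mapEffD sepL openL closeL level post d).1,
         (mapEffD sepL openL closeL level post d).2) := by
  intro post
  induction post with
  | nil =>
    intro pre d
    rw [PySem.List.pyRange_one_eq_nil (by simp)]
    simp [mapEffD]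
  | cons c rest ih =>
    intro pre d
    rw [PySem.List.pyRange_one_cons (by simp only [List.length_cons]; push_cast; omega)]
    have hget : ∀ x : Char, PySem.List.pyGetD (pre ++ x :: rest) (pre.length : Int) ' ' = x := by
      intro x; rw [PySem.List.pyGetD_natCast]; exact getD_append_cons pre rest x ' '
    have htake : PySem.List.slice (pre ++ c :: rest) none (some (pre.length : Int)) = pre := by
      rw [PySem.List.slice_to_natCast]; exact take_append_cons pre rest c
    have hdrop : PySem.List.slice (pre ++ c :: rest) (some ((pre.length : Int) + 1)) none = rest := by
      rw [show ((pre.length : Int) + 1) = ((pre.length + 1 : Nat) : Int) by push_cast; ring,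
        PySem.List.slice_from_natCast]
      exact drop_append_cons pre rest c
    have hstep : stepA sepL openL closeL level (pre ++ c :: rest, d) (pre.length : Int)
        = (pre ++ effC sepL level d c :: rest, newD openL closeL d (effC sepL level d c)) := by
      by_cases h : sepL.contains c ∧ d = level
      · have hmem : c ∈ sepL := by simpa using h.1
        simp [stepA, effC, newD, hget, htake, hdrop, hmem, h.2]
      · have hmem : ¬(c ∈ sepL ∧ d = level) := by simpa using h
        simp [stepA, effC, newD, hget, hmem]
    rw [List.foldl_cons, hstep]
    have heq : pre ++ effC sepL level d c :: rest = (pre ++ [effC sepL level d c]) ++ rest := by simp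
    have h1 : (pre.length : Int) + 1 = (((pre ++ [effC sepL level d c]).length : Nat) : Int) := by
      simp
    have h2 : (pre.length : Int) + ((c :: rest).length : Int)
        = (((pre ++ [effC sepL level d c]).length : Nat) : Int) + (rest.length : Int) := by
      simp only [List.length_cons, List.length_append, List.length_nil]
      push_cast; ring
    rw [heq, h2, h1, ih (pre ++ [effC sepL level d c]) (newD openL closeL d (effC sepL level d c))]
    simp [mapEffD]

-- B's loop, characterized against the same transformed stream.
theorem loopB_spec (sepL openL closeL : List Char) (level : Int) :
    ∀ (cs : List Char) (res : List String) (cur : List Char) (d : Int),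
    (cs.foldl (stepB sepL openL closeL level) (res, cur, d)).1
        ++ [String.ofList (cs.foldl (stepB sepL openL closeL level) (res, cur, d)).2.1]
      = res ++ (consFirst cur (splitSp (mapEffD sepL openL closeL level cs d).1)).map String.ofList := by
  intro cs
  induction cs with
  | nil => intro res cur d; simp [mapEffD, splitSp, consFirst]
  | cons c rest ih =>
    intro res cur d
    by_cases hec : effC sepL level d c = ' '
    · have hstep : stepB sepL openL closeL level (res, cur, d) c
          = (res ++ [String.ofList cur], [], newD openL closeL d (effC sepL level d c)) := by
        simp only [stepB]
        rw [show (if (sepL.contains c) ∧ d = level then ' ' else c) = effC sepL level d c from rfl,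
          hec]
        simp [newD]
      rw [List.foldl_cons, hstep, ih]
      have : splitSp (mapEffD sepL openL closeL level (c :: rest) d).1
          = [] :: splitSp (mapEffD sepL openL closeL level rest
              (newD openL closeL d (effC sepL level d c))).1 := by
        simp [mapEffD, splitSp, hec]
      rw [this]
      cases hs : splitSp (mapEffD sepL openL closeL level rest
          (newD openL closeL d (effC sepL level d c))).1 with
      | nil => exact absurd hs (splitSp_ne_nil _)
      | cons p ps => simp [consFirst]
    · have hstep : stepB sepL openL closeL level (res, cur, d) c
          = (res, cur ++ [effC sepL level d c], newD openL closeL d (effC sepL level d c)) := by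
        simp only [stepB]
        rw [show (if (sepL.contains c) ∧ d = level then ' ' else c) = effC sepL level d c from rfl,
          if_neg hec]
        simp [newD]
      rw [List.foldl_cons, hstep, ih]
      have : splitSp (mapEffD sepL openL closeL level (c :: rest) d).1
          = consFirst [effC sepL level d c]
              (splitSp (mapEffD sepL openL closeL level rest
                (newD openL closeL d (effC sepL level d c))).1) := by
        cases hs : splitSp (mapEffD sepL openL closeL level rest
            (newD openL closeL d (effC sepL level d c))).1 with
        | nil => exact absurd hs (splitSp_ne_nil _)
        | cons p ps => simp [mapEffD, splitSp, hec, hs, consFirst]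
      rw [this, consFirst_consFirst _ _ _ (splitSp_ne_nil _)]

theorem both_eq (string : String) (sep : String) (nests : List String) (level : Int) :
    nest_split string sep nests level = nest_split_alt string sep nests level := by
  simp only [nest_split, nest_split_alt]
  have hA := loopA_spec sep.toList (nests.getD 0 "").toList (nests.getD 1 "").toList level
    string.toList [] 0
  simp only [List.length_nil, Nat.cast_zero, List.nil_append, zero_add] at hA
  rw [hA, splitOn_eq_splitSp]
  have hB := loopB_spec sep.toList (nests.getD 0 "").toList (nests.getD 1 "").toList level
    string.toList [] [] 0
  rw [hB]
  cases hs : splitSp (mapEffD sep.toList (nests.getD 0 "").toList (nests.getD 1 "").toList level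
      string.toList 0).1 with
  | nil => exact absurd hs (splitSp_ne_nil _)
  | cons p ps => simp [consFirst]

-- ===== VERDICT (by name: the statement is the Claim_ definition above) =====
theorem nest_split_spec : Claim_equal_nest_split := by
  intro string sep nests level _ _
  unfold Spec_nest_split
  exact both_eq string sep nests level
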